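-- pv_equiv track=rewrite | github.com/6anandkumar/dsa-preparation | Binary Search/SearchInNearlySortedArray.py | SearchInNearlySortedArray
-- ===== SOURCE A (Python) =====
-- import math
--
-- def SearchInNearlySortedArray(arr:list,el:int)->int:
--     start = 0
--     end = len(arr)-1
--     while(start<=end):
--         mid = math.floor(start + (end-start)/2)
--         if(el == arr[mid] or (mid > 0 and el == arr[mid-1]) or (mid < len(arr)-1 and el == arr[mid+1])):
--             return mid if el==arr[mid] else mid-1 if (mid > 0 and el == arr[mid-1]) else mid+1
--         elif(el < arr[mid]):
--             end = mid-2
--         else: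
--             start = mid+2
--     return -1
-- ===== SOURCE B (Python) =====
-- def SearchInNearlySortedArray(arr: list, el: int) -> int:
--     def go(start, end):
--         if start > end:
--             return -1
--         mid = start + (end - start) // 2
--         if arr[mid] == el:
--             return mid
--         if mid > 0 and arr[mid - 1] == el:
--             return mid - 1
--         if mid < len(arr) - 1 and arr[mid + 1] == el:
--             return mid + 1
--         if el < arr[mid]:
--             return go(start, mid - 2)
--         return go(mid + 2, end)
--     return go(0, len(arr) - 1)
-- ===== Notes on version B (the rewrite author's own statement) =====
-- stated objective: alternative
-- what changed: Iterative while-loop with a compound or-condition and nested conditional-expression return, plus float-based math.floor midpoint, replaced by a recursive helper go(start,end) with sequential early-return checks and integer floor-division midpoint.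
import Mathlib
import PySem

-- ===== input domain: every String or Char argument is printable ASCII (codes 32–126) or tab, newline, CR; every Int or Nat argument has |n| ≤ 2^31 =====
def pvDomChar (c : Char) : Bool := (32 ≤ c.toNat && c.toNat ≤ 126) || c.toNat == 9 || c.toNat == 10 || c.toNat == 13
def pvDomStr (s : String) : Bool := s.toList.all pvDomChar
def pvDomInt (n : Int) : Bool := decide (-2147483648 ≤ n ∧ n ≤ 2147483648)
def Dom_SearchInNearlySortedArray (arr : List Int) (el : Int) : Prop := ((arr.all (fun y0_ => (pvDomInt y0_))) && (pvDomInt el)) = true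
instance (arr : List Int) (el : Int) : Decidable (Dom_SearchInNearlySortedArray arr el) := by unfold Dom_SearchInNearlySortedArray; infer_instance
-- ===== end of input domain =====

-- B replaces A's iterative while-loop (compound or-condition, nested conditional return,
-- float math.floor midpoint) by a recursive helper with sequential early-return checks and
-- an integer floor-division midpoint; same return value everywhere.

-- ===== PORT A =====
-- mid = math.floor(start + (end-start)/2): the float division by 2 is exact for the spans
-- reachable here (|end-start| ≤ 2^31), so it equals start + (end-start)//2, ported with
-- PySem.Int.floordiv. Indexing arr[mid] is ported with pyGetD 0: within the entry call
-- 0 ≤ start ≤ mid ≤ end ≤ len-1 always holds, so Python never raises (the default is never read).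
-- The fuel argument only makes the while-loop total: end-start shrinks by ≥ 2 each iteration,
-- so fuel = len(arr)+1 is never exhausted on the entry call.
def SearchInNearlySortedArrayLoop (fuel : Nat) (arr : List Int) (el : Int) (start endI : Int) : Int :=
  match fuel with
  | 0 => -1
  | fuel + 1 =>
    if start ≤ endI then
      if el = PySem.List.pyGetD arr (start + PySem.Int.floordiv (endI - start) 2) 0 ∨
         (start + PySem.Int.floordiv (endI - start) 2 > 0 ∧
           el = PySem.List.pyGetD arr (start + PySem.Int.floordiv (endI - start) 2 - 1) 0) ∨
         (start + PySem.Int.floordiv (endI - start) 2 < (arr.length : Int) - 1 ∧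
           el = PySem.List.pyGetD arr (start + PySem.Int.floordiv (endI - start) 2 + 1) 0) then
        if el = PySem.List.pyGetD arr (start + PySem.Int.floordiv (endI - start) 2) 0 then
          start + PySem.Int.floordiv (endI - start) 2
        else if start + PySem.Int.floordiv (endI - start) 2 > 0 ∧
           el = PySem.List.pyGetD arr (start + PySem.Int.floordiv (endI - start) 2 - 1) 0 then
          start + PySem.Int.floordiv (endI - start) 2 - 1
        else
          start + PySem.Int.floordiv (endI - start) 2 + 1
      else if el < PySem.List.pyGetD arr (start + PySem.Int.floordiv (endI - start) 2) 0 then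
        SearchInNearlySortedArrayLoop fuel arr el start (start + PySem.Int.floordiv (endI - start) 2 - 2)
      else
        SearchInNearlySortedArrayLoop fuel arr el (start + PySem.Int.floordiv (endI - start) 2 + 2) endI
    else
      -1

def SearchInNearlySortedArray (arr : List Int) (el : Int) : Int :=
  SearchInNearlySortedArrayLoop (arr.length + 1) arr el 0 ((arr.length : Int) - 1)

-- ===== PORT B =====
-- go(start, end) from Source B; indexing ported with pyGetD 0 (never out of range on the entry
-- call), fuel as above only makes the recursion total.
def SearchInNearlySortedArrayGo (fuel : Nat) (arr : List Int) (el : Int) (start endI : Int) : Int :=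
  match fuel with
  | 0 => -1
  | fuel + 1 =>
    if start > endI then -1
    else
      let mid := start + PySem.Int.floordiv (endI - start) 2
      if PySem.List.pyGetD arr mid 0 = el then mid
      else if mid > 0 ∧ PySem.List.pyGetD arr (mid - 1) 0 = el then mid - 1
      else if mid < (arr.length : Int) - 1 ∧ PySem.List.pyGetD arr (mid + 1) 0 = el then mid + 1
      else if el < PySem.List.pyGetD arr mid 0 then
        SearchInNearlySortedArrayGo fuel arr el start (mid - 2)
      else
        SearchInNearlySortedArrayGo fuel arr el (mid + 2) endI

def SearchInNearlySortedArray_alt (arr : List Int) (el : Int) : Int :=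
  SearchInNearlySortedArrayGo (arr.length + 1) arr el 0 ((arr.length : Int) - 1)

-- ===== PRECONDITION & SPEC =====
def Spec_SearchInNearlySortedArray (arr : List Int) (el : Int) (out : Int) : Prop := out = SearchInNearlySortedArray_alt arr el
instance (arr : List Int) (el : Int) (out : Int) : Decidable (Spec_SearchInNearlySortedArray arr el out) := by unfold Spec_SearchInNearlySortedArray; infer_instance

-- ===== CLAIM (what is proved, stated in full; the proofs are below) =====
def Claim_equal_SearchInNearlySortedArray : Prop := ∀ (arr : List Int) (el : Int), Dom_SearchInNearlySortedArray arr el → Spec_SearchInNearlySortedArray arr el (SearchInNearlySortedArray arr el)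

-- ===== LEMMAS AND PROOFS =====

lemma loop_eq_go (fuel : Nat) (arr : List Int) (el : Int) :
    ∀ start endI : Int, SearchInNearlySortedArrayLoop fuel arr el start endI =
      SearchInNearlySortedArrayGo fuel arr el start endI := by
  induction fuel with
  | zero => intro start endI; rfl
  | succ fuel ih =>
    intro start endI
    rw [SearchInNearlySortedArrayLoop, SearchInNearlySortedArrayGo]
    have hf : PySem.Int.floordiv (endI - start) 2 = (endI - start) / 2 :=
      PySem.Int.floordiv_eq_ediv_of_pos (by omega)
    simp only [hf]
    set m := start + (endI - start) / 2 with hm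
    set x := PySem.List.pyGetD arr m 0 with hx
    set y := PySem.List.pyGetD arr (m - 1) 0 with hy
    set z := PySem.List.pyGetD arr (m + 1) 0 with hz
    by_cases h : start ≤ endI
    · simp only [h, if_true, show ¬ start > endI by omega, if_false]
      by_cases h1 : el = x
      · rw [if_pos (Or.inl h1), if_pos h1, if_pos h1.symm]
      · have h1' : ¬ x = el := fun he => h1 he.symm
        rw [if_neg h1']
        by_cases h2 : m > 0 ∧ el = y
        · rw [if_pos (Or.inr (Or.inl h2)), if_neg h1, if_pos h2,
            if_pos ⟨h2.1, h2.2.symm⟩]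
        · have h2' : ¬ (m > 0 ∧ y = el) := fun ⟨a, b⟩ => h2 ⟨a, b.symm⟩
          rw [if_neg h2']
          by_cases h3 : m < (arr.length : Int) - 1 ∧ el = z
          · rw [if_pos (Or.inr (Or.inr h3)), if_neg h1, if_neg h2,
              if_pos ⟨h3.1, h3.2.symm⟩]
          · have h3' : ¬ (m < (arr.length : Int) - 1 ∧ z = el) :=
              fun ⟨a, b⟩ => h3 ⟨a, b.symm⟩
            rw [if_neg h3',
              if_neg (fun hc => hc.elim h1 (fun hc' => hc'.elim h2 h3))]
            by_cases h4 : el < x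
            · rw [if_pos h4, if_pos h4]; exact ih _ _
            · rw [if_neg h4, if_neg h4]; exact ih _ _
    · simp only [h, if_false, show start > endI by omega, if_true]

-- ===== VERDICT (by name: the statement is the Claim_ definition above) =====
theorem SearchInNearlySortedArray_spec : Claim_equal_SearchInNearlySortedArray := by
  intro arr el _
  unfold Spec_SearchInNearlySortedArray SearchInNearlySortedArray SearchInNearlySortedArray_alt
  exact loop_eq_go (arr.length + 1) arr el 0 ((arr.length : Int) - 1)
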